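-- pv_equiv track=rewrite | github.com/Sambour/Concierge-bot | utils.py | concat_preds
-- ===== SOURCE A (Python) =====
-- def add_quote(item):
--     item = item.replace('\'', '\\\'')
--     if item.isdigit():
--         return item
--     return '\'' + item + '\''
--
-- def concat_preds(pred, values):
--     '''
--     concatenate the predicate name with its values to get the full formatted predicate.
--     pred: predicate name.
--     values: a list of predicate values.
--     '''
--     result = ''
--     value_list = []
--     if not values:
--         return result
--     for item in values:
--         value_list.append(',,,'.join(list(item.values())))
--     value_list = list(dict.fromkeys(value_list))
--     value_list = [item.split(',,,') for item in value_list]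
--     for item in value_list:
--         result += pred + '(' + ','.join([add_quote(value) for value in item]) + '). '
--     return result
-- ===== SOURCE B (Python) =====
-- def add_quote(item):
--     item = item.replace('\'', '\\\'')
--     if item.isdigit():
--         return item
--     return '\'' + item + '\''
--
-- def concat_preds(pred, values):
--     '''Worklist nub: format the first key, drop all its duplicates from the worklist, repeat.'''
--     keys = [',,,'.join(list(item.values())) for item in values]
--     result = ''
--     while keys:
--         k = keys[0]
--         result += pred + '(' + ','.join(add_quote(v) for v in k.split(',,,')) + '). '
--         keys = [r for r in keys[1:] if r != k]
--     return result
-- ===== Notes on version B (the rewrite author's own statement) =====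
-- stated objective: alternative
-- what changed: Replaces A's dict.fromkeys staged dedup with a worklist nub: format the first key of the worklist, filter all its duplicates out of the rest, and repeat on the shrunken worklist (no dict/set, duplicate removal by list filtering).
import Mathlib
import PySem

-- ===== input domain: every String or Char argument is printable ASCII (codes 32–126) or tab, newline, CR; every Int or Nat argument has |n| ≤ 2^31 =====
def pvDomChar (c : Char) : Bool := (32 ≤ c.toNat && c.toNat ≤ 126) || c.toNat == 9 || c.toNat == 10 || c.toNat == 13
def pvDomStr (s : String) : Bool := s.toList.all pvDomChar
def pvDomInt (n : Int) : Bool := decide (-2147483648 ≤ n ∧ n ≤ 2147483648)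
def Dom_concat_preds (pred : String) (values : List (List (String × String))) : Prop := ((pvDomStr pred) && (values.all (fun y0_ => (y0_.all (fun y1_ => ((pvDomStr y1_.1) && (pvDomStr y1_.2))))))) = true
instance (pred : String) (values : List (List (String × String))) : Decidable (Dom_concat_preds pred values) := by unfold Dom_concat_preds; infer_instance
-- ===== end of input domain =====

-- B is a worklist nub (emit the first key, filter all its duplicates out of the worklist, repeat)
-- replacing A's dict.fromkeys staged dedup; same return value everywhere.

-- ===== PORT A =====
def add_quote (item : String) : String :=
  let item := PySem.Str.replace item "'" "\\'"
  if PySem.Str.strIsdigit item then item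
  else "'" ++ item ++ "'"

-- list(item.values()) on a Python dict built from the assoc list
def dictValues (item : List (String × String)) : List String :=
  (PySem.Dict.ofList item).values

-- key.split(',,,'): the separator is the nonempty literal ",,,", so split? is always `some`
-- and the default [] is never used
def splitKey (key : String) : List String :=
  (PySem.Str.split? key ",,,").getD []

def concat_preds (pred : String) (values : List (List (String × String))) : String :=
  let result : String := ""
  if values.isEmpty then result
  else
    let value_list : List String :=
      values.foldl (fun acc item => acc ++ [PySem.Str.join ",,," (dictValues item)]) []
    let value_list := PySem.List.dedup value_list
    let value_list := value_list.map (fun item => splitKey item)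
    value_list.foldl
      (fun result item =>
        result ++ pred ++ "(" ++ PySem.Str.join "," (item.map add_quote) ++ "). ")
      result

-- ===== PORT B =====
-- the while loop: format the first key of the worklist, drop its duplicates, continue
def concat_preds_alt_go (pred : String) : List String → String → String
  | [], result => result
  | k :: rest, result =>
    concat_preds_alt_go pred (rest.filter (fun r => r != k))
      (result ++ pred ++ "(" ++ PySem.Str.join "," ((splitKey k).map add_quote) ++ "). ")
termination_by keys _ => keys.length
decreasing_by
  simp only [List.unattach_filter, List.unattach_attach]
  exact Nat.lt_succ_of_le (List.length_filter_le _ _)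

def concat_preds_alt (pred : String) (values : List (List (String × String))) : String :=
  concat_preds_alt_go pred (values.map (fun item => PySem.Str.join ",,," (dictValues item))) ""

-- ===== PRECONDITION & SPEC =====
def Spec_concat_preds (pred : String) (values : List (List (String × String))) (out : String) : Prop := out = concat_preds_alt pred values
instance (pred : String) (values : List (List (String × String))) (out : String) : Decidable (Spec_concat_preds pred values out) := by unfold Spec_concat_preds; infer_instance

-- ===== CLAIM (what is proved, stated in full; the proofs are below) =====
def Claim_equal_concat_preds : Prop := ∀ (pred : String) (values : List (List (String × String))), Dom_concat_preds pred values → Spec_concat_preds pred values (concat_preds pred values)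

-- ===== LEMMAS AND PROOFS =====

-- the formatted chunk appended for one dedup key
def fmtKey (pred key : String) : String :=
  pred ++ "(" ++ PySem.Str.join "," ((splitKey key).map add_quote) ++ "). "

-- concatenation of a list of strings
def strCat : List String → String
  | [] => ""
  | s :: rest => s ++ strCat rest

theorem foldl_fmt (pred : String) (l : List String) (s : String) :
    l.foldl (fun r k => r ++ pred ++ "(" ++ PySem.Str.join "," ((splitKey k).map add_quote) ++ "). ") s
      = s ++ strCat (l.map (fmtKey pred)) := by
  induction l generalizing s with
  | nil => simp [strCat]
  | cons k ks ih =>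
    simp only [List.foldl_cons, List.map_cons, strCat]
    rw [ih]
    simp [fmtKey, String.append_assoc]

theorem discard_eq_filter (s : List String) (x : String) :
    PySem.Set.discard s x = s.filter (fun y => y != x) := rfl

theorem ofList_filter (l : List String) (p : String → Bool) :
    PySem.Set.ofList (l.filter p) = (PySem.Set.ofList l).filter p := by
  induction l with
  | nil => simp [PySem.Set.ofList_nil]
  | cons x l ih =>
    by_cases hx : p x
    · rw [List.filter_cons_of_pos hx, PySem.Set.ofList_cons, PySem.Set.ofList_cons,
        List.filter_cons_of_pos hx, discard_eq_filter, discard_eq_filter, ih,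
        List.filter_filter, List.filter_filter]
      congr 1
      apply List.filter_congr
      intro y _
      by_cases hy : y = x <;> simp [hy, Bool.and_comm]
    · rw [List.filter_cons_of_neg hx, PySem.Set.ofList_cons, List.filter_cons_of_neg hx,
        discard_eq_filter, ih, List.filter_filter]
      apply List.filter_congr
      intro y _
      by_cases hy : y = x
      · subst hy; simp [hx]
      · simp [hy]

theorem go_eq_aux (pred : String) : ∀ (n : Nat) (ks : List String) (acc : String), ks.length ≤ n →
    concat_preds_alt_go pred ks acc = acc ++ strCat ((PySem.Set.ofList ks).map (fmtKey pred)) := by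
  intro n
  induction n with
  | zero =>
    intro ks acc hks
    have : ks = [] := List.eq_nil_of_length_eq_zero (Nat.le_zero.mp hks)
    subst this
    simp [concat_preds_alt_go, PySem.Set.ofList_nil, strCat]
  | succ n ih =>
    intro ks acc hks
    cases ks with
    | nil => simp [concat_preds_alt_go, PySem.Set.ofList_nil, strCat]
    | cons k rest =>
      rw [concat_preds_alt_go,
        ih (rest.filter (fun r => r != k)) _
          (le_trans (List.length_filter_le _ _) (Nat.le_of_succ_le_succ hks)),
        PySem.Set.ofList_cons, discard_eq_filter, ← ofList_filter]
      simp [strCat, fmtKey, String.append_assoc]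

theorem go_eq (pred : String) (ks : List String) (acc : String) :
    concat_preds_alt_go pred ks acc = acc ++ strCat ((PySem.Set.ofList ks).map (fmtKey pred)) :=
  go_eq_aux pred ks.length ks acc (le_refl _)

-- ===== VERDICT (by name: the statement is the Claim_ definition above) =====
theorem concat_preds_spec : Claim_equal_concat_preds := by
  intro pred values _
  unfold Spec_concat_preds concat_preds concat_preds_alt
  rw [go_eq]
  by_cases h : values.isEmpty
  · have hnil : values = [] := by cases values <;> simp_all
    subst hnil
    simp [PySem.Set.ofList_nil, strCat]
  · rw [if_neg h]
    simp only [PySem.List.foldl_append_singleton_eq_map, List.nil_append,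
      PySem.List.dedup_eq_ofList, List.foldl_map, foldl_fmt]
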